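-- pv_equiv track=rewrite | github.com/sarahpmedeiros/course-2017-spr-proj | jspinell_mpinheir/transformation3.py | maxRate
-- ===== SOURCE A (Python) =====
-- def maxRate(X):
--     max1 = 0
--     max2 = 0
--     max3 = 0
--     max4 = 0
--     max5 = 0
--     for i in range(len(X)):
--         if X[i][0] == 1998:
--             max1 = max(max1,X[i][1])
--         if X[i][0] == 1806:
--             max2 = max(max2,X[i][1])
--         if X[i][0] == 1614:
--             max3 = max(max3,X[i][1])
--         if X[i][0] == 1422:
--             max4 = max(max4,X[i][1])
--         if X[i][0] == 1230:
--             max5 = max(max5,X[i][1])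
--
--
--     tierToMax = [(1998,max1),(1806,max2),(1614,max3),(1422,max4),(1230,max5)]
--
--     return tierToMax
-- ===== SOURCE B (Python) =====
-- def maxRate(X):
--     return [(tier, max([0] + [r[1] for r in X if r[0] == tier]))
--             for tier in (1998, 1806, 1614, 1422, 1230)]
-- ===== Notes on version B (the rewrite author's own statement) =====
-- stated objective: simpler
-- what changed: Replaces the one-pass loop with five named accumulators by a comprehension that, for each fixed tier id, filters X and takes max with a 0 seed.
import Mathlib
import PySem

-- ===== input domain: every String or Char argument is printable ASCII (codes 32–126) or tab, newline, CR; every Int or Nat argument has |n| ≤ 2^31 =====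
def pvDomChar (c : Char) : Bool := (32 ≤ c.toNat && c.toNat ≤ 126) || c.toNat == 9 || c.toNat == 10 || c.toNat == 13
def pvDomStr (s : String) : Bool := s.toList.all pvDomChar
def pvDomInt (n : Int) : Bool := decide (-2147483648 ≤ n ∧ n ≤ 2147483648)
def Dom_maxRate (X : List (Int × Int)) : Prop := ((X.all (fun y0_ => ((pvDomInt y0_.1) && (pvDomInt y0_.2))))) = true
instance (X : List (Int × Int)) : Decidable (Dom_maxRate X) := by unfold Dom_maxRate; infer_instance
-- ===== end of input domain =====

-- ===== PORT A =====
-- Port of A: one pass with five accumulators, folded over the same state.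
def maxRate (X : List (Int × Int)) : List (Int × Int) :=
  let m := X.foldl (fun (m : Int × Int × Int × Int × Int) r =>
    let m1 := if r.1 = 1998 then max m.1 r.2 else m.1
    let m2 := if r.1 = 1806 then max m.2.1 r.2 else m.2.1
    let m3 := if r.1 = 1614 then max m.2.2.1 r.2 else m.2.2.1
    let m4 := if r.1 = 1422 then max m.2.2.2.1 r.2 else m.2.2.2.1
    let m5 := if r.1 = 1230 then max m.2.2.2.2 r.2 else m.2.2.2.2
    (m1, m2, m3, m4, m5)) (0, 0, 0, 0, 0)
  [(1998, m.1), (1806, m.2.1), (1614, m.2.2.1), (1422, m.2.2.2.1), (1230, m.2.2.2.2)]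

-- ===== PORT B =====
-- Port of B: for each fixed tier, filter X and fold max from the 0 seed.
def tierMax (X : List (Int × Int)) (tier : Int) : Int :=
  ((X.filter (fun r => r.1 = tier)).map Prod.snd).foldl max 0

def maxRate_alt (X : List (Int × Int)) : List (Int × Int) :=
  [(1998 : Int), 1806, 1614, 1422, 1230].map (fun tier => (tier, tierMax X tier))

-- ===== PRECONDITION & SPEC =====
def Spec_maxRate (X : List (Int × Int)) (out : List (Int × Int)) : Prop := out = maxRate_alt X
instance (X : List (Int × Int)) (out : List (Int × Int)) : Decidable (Spec_maxRate X out) := by unfold Spec_maxRate; infer_instance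

-- ===== CLAIM (what is proved, stated in full; the proofs are below) =====
def Claim_equal_maxRate : Prop := ∀ (X : List (Int × Int)), Dom_maxRate X → Spec_maxRate X (maxRate X)

-- ===== LEMMAS AND PROOFS =====

-- ===== VERDICT (by name: the statement is the Claim_ definition above) =====
-- one tier's accumulator, started at m
def g (t : Int) (m : Int) (X : List (Int × Int)) : Int :=
  X.foldl (fun m r => if r.1 = t then max m r.2 else m) m

theorem g_eq_tierMax_aux (t m : Int) (X : List (Int × Int)) :
    g t m X = ((X.filter (fun r => r.1 = t)).map Prod.snd).foldl max m := by
  induction X generalizing m with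
  | nil => rfl
  | cons x xs ih =>
    simp only [g, List.foldl_cons, List.filter_cons]
    by_cases h : x.1 = t
    · simp only [h, decide_true, if_true, List.map_cons, List.foldl_cons]
      exact ih _
    · simp only [h, decide_false, Bool.false_eq_true, if_false]
      exact ih m

theorem foldl_components (X : List (Int × Int)) (m : Int × Int × Int × Int × Int) :
    X.foldl (fun (m : Int × Int × Int × Int × Int) r =>
      let m1 := if r.1 = 1998 then max m.1 r.2 else m.1
      let m2 := if r.1 = 1806 then max m.2.1 r.2 else m.2.1
      let m3 := if r.1 = 1614 then max m.2.2.1 r.2 else m.2.2.1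
      let m4 := if r.1 = 1422 then max m.2.2.2.1 r.2 else m.2.2.2.1
      let m5 := if r.1 = 1230 then max m.2.2.2.2 r.2 else m.2.2.2.2
      (m1, m2, m3, m4, m5)) m
    = (g 1998 m.1 X, g 1806 m.2.1 X, g 1614 m.2.2.1 X, g 1422 m.2.2.2.1 X, g 1230 m.2.2.2.2 X) := by
  induction X generalizing m with
  | nil => rfl
  | cons x xs ih => simp [List.foldl_cons, ih, g]

theorem maxRate_spec : Claim_equal_maxRate := by
  intro X _
  unfold Spec_maxRate maxRate maxRate_alt
  simp only [foldl_components, tierMax]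
  refine congrArg₂ _ (congrArg _ ?_) (congrArg₂ _ (congrArg _ ?_) (congrArg₂ _ (congrArg _ ?_)
    (congrArg₂ _ (congrArg _ ?_) (congrArg₂ _ (congrArg _ ?_) rfl)))) <;>
    exact g_eq_tierMax_aux _ 0 X
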